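-- pv_equiv track=rewrite | github.com/TypMitSchnurrbart/ss23_stochastik | src/correlation_analysis.py | get_correlation_data
-- ===== SOURCE A (Python) =====
-- def get_correlation_data(data : dict, ident : list):
--     """
--     Extract all the interest points
--     """
--
--     # Compute the Idents that are intersting for us
--     start_index = ident.index("Finishing")
--     end_index = ident.index("SlidingTackle")
--
--     # Build the data dict
--     data_dict = {}
--     for stat in ident[start_index : end_index+1]:
--         data_dict[stat] = []
--
--
--     # Get data per player
--     for player in data:
--
--         for stat_index in range(start_index, end_index+1):
--
--             try:
--                 data_dict[ident[stat_index]].append(int(player[stat_index]))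
--             except ValueError:
--                 continue
--
--
--     return data_dict, ident[start_index:end_index+1]
-- ===== SOURCE B (Python) =====
-- def _parse(cell):
--     """int(cell), or None if int() raises ValueError."""
--     try:
--         return int(cell)
--     except ValueError:
--         return None
--
--
-- def get_correlation_data(data, ident):
--     """
--     Extract all the interest points, in three staged passes:
--     parse the sliced rows into a grid of optional ints, transpose the grid
--     with zip(*...), then drop the Nones per column.
--     """
--     start = ident.index("Finishing")
--     stop = ident.index("SlidingTackle") + 1
--     cols = ident[start:stop]
--
--     grid = [[_parse(cell) for cell in row[start:stop]] for row in data]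
--     columns = list(zip(*grid)) if grid else [()] * len(cols)
--
--     return {name: [v for v in col if v is not None]
--             for name, col in zip(cols, columns)}, cols
-- ===== Notes on version B (the rewrite author's own statement) =====
-- stated objective: alternative
-- what changed: B works in staged passes on an intermediate matrix: it parses the sliced rows into a grid of optional ints, transposes the grid with zip(*...), and drops the Nones per column in a dict comprehension, instead of A's nested player/stat loops appending cell by cell into pre-initialised dict lists.
import Mathlib
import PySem

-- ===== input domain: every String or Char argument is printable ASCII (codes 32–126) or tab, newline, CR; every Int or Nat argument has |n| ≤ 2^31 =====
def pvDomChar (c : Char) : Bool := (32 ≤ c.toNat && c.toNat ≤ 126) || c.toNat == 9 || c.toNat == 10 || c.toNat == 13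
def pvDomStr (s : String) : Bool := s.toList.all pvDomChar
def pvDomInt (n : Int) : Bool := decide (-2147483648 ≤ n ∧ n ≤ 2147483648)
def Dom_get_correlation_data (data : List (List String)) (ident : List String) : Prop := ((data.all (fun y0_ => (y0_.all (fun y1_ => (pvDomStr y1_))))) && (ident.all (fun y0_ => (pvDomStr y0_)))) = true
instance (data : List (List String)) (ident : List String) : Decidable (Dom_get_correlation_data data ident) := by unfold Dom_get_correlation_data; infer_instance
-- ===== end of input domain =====

-- B computes the result in staged passes over an intermediate matrix (parse the sliced rows into a grid
-- of optional ints, transpose it with zip(*...), drop the Nones per column) instead of A's nested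
-- player/stat loops appending cell by cell into pre-initialised dict lists; same cost ("alternative").

-- ===== PORT A =====
-- one inner-loop step of A: data_dict[ident[stat_index]].append(int(player[stat_index])) under try/except ValueError
def pvStepA (ident : List String) (p : List String) (d : PySem.Dict String (List Int)) (i : Int) : PySem.Dict String (List Int) :=
  match PySem.List.pyGet? ident i with
  | none => d            -- unreachable: i is a valid index into ident
  | some key =>
    match d.get? key with
    | none => d          -- KeyError: impossible, keys were initialised from the same index range
    | some lst =>
      match PySem.List.pyGet? p i with
      | none => d        -- IndexError: excluded by Pre_
      | some cell =>
        match PySem.Int.ofStr? cell with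
        | none => d      -- ValueError: 'continue'
        | some v => d.insert key (lst ++ [v])

def get_correlation_data (data : List (List String)) (ident : List String) : (List (String × List Int)) × List String :=
  match PySem.List.index? ident "Finishing", PySem.List.index? ident "SlidingTackle" with
  | some start_index, some end_index =>
    let data_dict : PySem.Dict String (List Int) :=
      (PySem.List.slice ident (some (start_index : Int)) (some ((end_index : Int) + 1))).foldl
        (fun d stat => d.insert stat []) PySem.Dict.empty
    let data_dict := data.foldl (fun d p =>
      (PySem.List.pyRange (start_index : Int) ((end_index : Int) + 1) 1).foldl (pvStepA ident p) d) data_dict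
    (data_dict.items, PySem.List.slice ident (some (start_index : Int)) (some ((end_index : Int) + 1)))
  | _, _ => ([], [])     -- ValueError from ident.index(...): excluded by Pre_

-- ===== PORT B =====
-- _parse: int(cell), or None if int() raises ValueError
def pvParse (cell : String) : Option Int := PySem.Int.ofStr? cell

-- zip(*grid): columns of the grid, truncated at the shortest row (Python's zip)
def pvZipStar {α : Type} [Inhabited α] (grid : List (List α)) : List (List α) :=
  if h : grid ≠ [] ∧ ∀ r ∈ grid, r ≠ [] then
    (grid.map List.headI) :: pvZipStar (grid.map List.tail)
  else []
termination_by grid.headI.length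
decreasing_by
  obtain ⟨hne, hrows⟩ := h
  rcases grid with _ | ⟨r, rest⟩
  · exact absurd rfl hne
  · have hr : r ≠ [] := hrows r List.mem_cons_self
    have hpos : 0 < r.length := List.length_pos_of_ne_nil hr
    simp only [List.map_cons, List.headI_cons, List.length_tail]
    omega

def get_correlation_data_alt (data : List (List String)) (ident : List String) : (List (String × List Int)) × List String :=
  match PySem.List.index? ident "Finishing" with
  | some start =>
    match PySem.List.index? ident "SlidingTackle" with
    | some e =>
      let stop : Int := (e : Int) + 1
      let cols := PySem.List.slice ident (some (start : Int)) (some stop)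
      let grid := data.map (fun row => (PySem.List.slice row (some (start : Int)) (some stop)).map pvParse)
      let columns := if grid ≠ [] then pvZipStar grid else List.replicate cols.length ([] : List (Option Int))
      let result := (cols.zip columns).foldl
        (fun d q => d.insert q.1 (q.2.filterMap id)) PySem.Dict.empty
      (result.items, cols)
    | none => ([], [])   -- ValueError from ident.index(...): excluded by Pre_
  | none => ([], [])     -- ValueError from ident.index(...): excluded by Pre_

-- ===== PRECONDITION & SPEC =====
-- Pre_ excludes inputs where A raises (marker "Finishing"/"SlidingTackle" missing → ValueError; a player
-- row shorter than the stat range → IndexError) and, as a defensible corner, duplicate stat names inside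
-- the extracted range, where A's accidental dict behaviour interleaves two columns under one key while B
-- keeps one column per name.
def Pre_get_correlation_data (data : List (List String)) (ident : List String) : Prop :=
  "Finishing" ∈ ident ∧ "SlidingTackle" ∈ ident ∧
  ((ident.drop (ident.idxOf "Finishing")).take (ident.idxOf "SlidingTackle" + 1 - ident.idxOf "Finishing")).Nodup ∧
  (ident.idxOf "Finishing" ≤ ident.idxOf "SlidingTackle" →
    ∀ p ∈ data, ident.idxOf "SlidingTackle" < p.length)
instance (data : List (List String)) (ident : List String) : Decidable (Pre_get_correlation_data data ident) := by unfold Pre_get_correlation_data; infer_instance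

def pvWitness_get_correlation_data : List (List String) × List String :=
  ([["1", "2"], ["x", "3"]], ["Finishing", "SlidingTackle"])

def Spec_get_correlation_data (data : List (List String)) (ident : List String) (out : (List (String × List Int)) × List String) : Prop := out = get_correlation_data_alt data ident
instance (data : List (List String)) (ident : List String) (out : (List (String × List Int)) × List String) : Decidable (Spec_get_correlation_data data ident out) := by unfold Spec_get_correlation_data; infer_instance

-- ===== CLAIM (what is proved, stated in full; the proofs are below) =====
def Claim_equal_get_correlation_data : Prop := ∀ (data : List (List String)) (ident : List String), Dom_get_correlation_data data ident → Pre_get_correlation_data data ident → Spec_get_correlation_data data ident (get_correlation_data data ident)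

-- ===== LEMMAS AND PROOFS =====

-- the contribution of one cell: [int(cell)] if convertible, [] if int() raises ValueError
def pvCell (p : List String) (i : Int) : List Int :=
  match (PySem.List.pyGet? p i).bind PySem.Int.ofStr? with
  | some v => [v]
  | none => []

lemma pvIndex?_of_mem (l : List String) (v : String) (h : v ∈ l) :
    PySem.List.index? l v = some (l.idxOf v) := by
  rw [PySem.List.index?_eq_idxOf?]
  induction l with
  | nil => simp at h
  | cons a l ih =>
    by_cases hv : a = v
    · subst hv; simp [List.idxOf?_cons]
    · rcases List.mem_cons.mp h with rfl | h'
      · exact absurd rfl hv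
      · simp [List.idxOf?_cons, hv, ih h', beq_iff_eq]

-- folding fresh-key inserts over a dict
lemma pvFoldInsert {α : Type} (f : α → String) (g : α → List Int) :
    ∀ (l : List α) (d : PySem.Dict String (List Int)),
      (l.map f).Nodup → (∀ x ∈ l, d.get? (f x) = none) →
      ((l.foldl (fun d x => d.insert (f x) (g x)) d).keys = d.keys ++ l.map f
       ∧ (∀ x ∈ l, (l.foldl (fun d x => d.insert (f x) (g x)) d).get? (f x) = some (g x))
       ∧ ∀ k, (∀ x ∈ l, f x ≠ k) → (l.foldl (fun d x => d.insert (f x) (g x)) d).get? k = d.get? k) := by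
  intro l
  induction l with
  | nil => intro d _ _; refine ⟨by simp, by simp, fun k _ => by simp⟩
  | cons a l ih =>
    intro d hnd hfresh
    simp only [List.map_cons, List.nodup_cons] at hnd
    obtain ⟨hafresh, hndl⟩ := hnd
    have hne : ∀ x ∈ l, f x ≠ f a := by
      intro x hx h
      exact hafresh (h ▸ List.mem_map_of_mem hx)
    have hfresh' : ∀ x ∈ l, (d.insert (f a) (g a)).get? (f x) = none := by
      intro x hx
      rw [PySem.Dict.get?_insert_of_ne _ _ (hne x hx)]
      exact hfresh x (List.mem_cons_of_mem a hx)
    obtain ⟨hk, hg1, hg2⟩ := ih (d.insert (f a) (g a)) hndl hfresh'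
    have hcont : d.contains (f a) = false := by
      have := hfresh a List.mem_cons_self
      rwa [PySem.Dict.get?_eq_none_iff_contains] at this
    refine ⟨?_, ?_, ?_⟩
    · simp only [List.foldl_cons, hk]
      rw [PySem.Dict.keys_insert_of_not_contains (h := hcont)]
      simp
    · intro x hx
      rcases List.mem_cons.mp hx with rfl | hx'
      · simp only [List.foldl_cons]
        rw [hg2 (f x) hne]
        exact PySem.Dict.get?_insert_self _ _ _
      · simpa only [List.foldl_cons] using hg1 x hx'
    · intro k hk'
      simp only [List.foldl_cons]
      rw [hg2 k (fun x hx => hk' x (List.mem_cons_of_mem a hx))]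
      exact PySem.Dict.get?_insert_of_ne _ _ (Ne.symm (hk' a List.mem_cons_self))

lemma pvInnerFold (ident p : List String) (s e : Nat) (cols : List String)
    (hcols : cols = (ident.drop s).take (e + 1 - s)) (hnd : cols.Nodup) (hel : e < ident.length) :
    ∀ (ts : List Nat) (d : PySem.Dict String (List Int)), ts.Nodup → (∀ t ∈ ts, t < e + 1 - s) →
      d.keys = cols →
      ((ts.foldl (fun d (t : Nat) => pvStepA ident p d ((s : Int) + (t : Int))) d).keys = cols
       ∧ ∀ (j : Nat) (hj : j < e + 1 - s),
           (ts.foldl (fun d (t : Nat) => pvStepA ident p d ((s : Int) + (t : Int))) d).get?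
               (ident[s + j]'(by omega)) =
             if j ∈ ts then (d.get? (ident[s + j]'(by omega))).map (· ++ pvCell p ((s : Int) + (j : Int)))
             else d.get? (ident[s + j]'(by omega))) := by
  have hlen : cols.length = e + 1 - s := by subst hcols; simp; omega
  have hgetc : ∀ (j : Nat) (hj : j < e + 1 - s),
      cols[j]'(by omega) = ident[s + j]'(by omega) := by
    intro j hj; subst hcols; simp
  have hmemc : ∀ (j : Nat) (hj : j < e + 1 - s), ident[s + j]'(by omega) ∈ cols := by
    intro j hj; rw [← hgetc j hj]; exact List.getElem_mem _
  have hne : ∀ (j t : Nat) (hj : j < e + 1 - s) (ht : t < e + 1 - s), j ≠ t →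
      ident[s + j]'(by omega) ≠ ident[s + t]'(by omega) := by
    intro j t hj ht hjt h
    rw [← hgetc j hj, ← hgetc t ht] at h
    exact hjt ((List.Nodup.getElem_inj_iff hnd).mp h)
  have hstep : ∀ (d : PySem.Dict String (List Int)) (t : Nat), d.keys = cols → t < e + 1 - s →
      ((pvStepA ident p d ((s : Int) + (t : Int))).keys = cols ∧
       ∀ (j : Nat) (hj : j < e + 1 - s),
         (pvStepA ident p d ((s : Int) + (t : Int))).get? (ident[s + j]'(by omega)) =
           if j = t then (d.get? (ident[s + j]'(by omega))).map (· ++ pvCell p ((s : Int) + (j : Int)))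
           else d.get? (ident[s + j]'(by omega))) := by
    intro d t hkeys ht
    have hi : (s : Int) + (t : Int) = ((s + t : Nat) : Int) := by push_cast; ring
    have hident : PySem.List.pyGet? ident ((s : Int) + (t : Int)) = some (ident[s + t]'(by omega)) := by
      rw [hi, PySem.List.pyGet?_natCast, List.getElem?_eq_getElem (by omega)]
    obtain ⟨lst, hlst⟩ : ∃ lst, d.get? (ident[s + t]'(by omega)) = some lst := by
      cases hg : d.get? (ident[s + t]'(by omega)) with
      | some lst => exact ⟨lst, rfl⟩
      | none =>
        rw [PySem.Dict.get?_eq_none_iff_contains] at hg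
        have : (ident[s + t]'(by omega)) ∈ d.keys := hkeys ▸ hmemc t ht
        rw [← PySem.Dict.contains_iff_mem_keys] at this
        rw [this] at hg
        exact absurd hg (by simp)
    have hcont : d.contains (ident[s + t]'(by omega)) = true := by
      rw [PySem.Dict.contains_iff_mem_keys]; exact hkeys ▸ hmemc t ht
    unfold pvStepA
    rcases hg : PySem.List.pyGet? p ((s : Int) + (t : Int)) with _ | cell
    · simp only [hident, hlst]
      refine ⟨hkeys, ?_⟩
      intro j hj
      by_cases hjt : j = t
      · subst hjt; simp [pvCell, hg, hlst]
      · simp [hjt]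
    · rcases ho : PySem.Int.ofStr? cell with _ | v
      · simp only [hident, hlst, ho]
        refine ⟨hkeys, ?_⟩
        intro j hj
        by_cases hjt : j = t
        · subst hjt; simp [pvCell, hg, ho, hlst]
        · simp [hjt]
      · simp only [hident, hlst, ho]
        refine ⟨?_, ?_⟩
        · rw [PySem.Dict.keys_insert_of_contains (h := hcont)]; exact hkeys
        · intro j hj
          by_cases hjt : j = t
          · subst hjt
            rw [PySem.Dict.get?_insert_self]
            simp [pvCell, hg, ho, hlst]
          · rw [if_neg hjt]
            exact PySem.Dict.get?_insert_of_ne _ _ (hne j t hj ht hjt)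
  intro ts
  induction ts with
  | nil => intro d _ _ hkeys; exact ⟨hkeys, by simp⟩
  | cons t ts ih =>
    intro d hndts hbound hkeys
    obtain ⟨htnotin, hndts'⟩ := List.nodup_cons.mp hndts
    have ht : t < e + 1 - s := hbound t (List.mem_cons_self)
    obtain ⟨hk1, hg1⟩ := hstep d t hkeys ht
    obtain ⟨hk2, hg2⟩ := ih (pvStepA ident p d ((s : Int) + (t : Int))) hndts'
      (fun x hx => hbound x (List.mem_cons_of_mem t hx)) hk1
    refine ⟨by simpa using hk2, ?_⟩
    intro j hj
    rw [List.foldl_cons]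
    rw [hg2 j hj, hg1 j hj]
    by_cases hjt : j = t
    · subst hjt
      simp [htnotin]
    · simp only [if_neg hjt]
      by_cases hjts : j ∈ ts
      · rw [if_pos hjts, if_pos (show j ∈ t :: ts from List.mem_cons_of_mem t hjts)]
      · rw [if_neg hjts, if_neg (by simp [List.mem_cons, hjt, hjts])]

lemma pvOuterFold (ident : List String) (s e : Nat) (cols : List String)
    (hcols : cols = (ident.drop s).take (e + 1 - s)) (hnd : cols.Nodup) (hel : e < ident.length) :
    ∀ (data : List (List String)) (d : PySem.Dict String (List Int)), d.keys = cols →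
      ((data.foldl (fun d p =>
          (PySem.List.pyRange (s : Int) ((e : Int) + 1) 1).foldl (pvStepA ident p) d) d).keys = cols
       ∧ ∀ (j : Nat) (hj : j < e + 1 - s),
           (data.foldl (fun d p =>
               (PySem.List.pyRange (s : Int) ((e : Int) + 1) 1).foldl (pvStepA ident p) d) d).get?
               (ident[s + j]'(by omega)) =
             (d.get? (ident[s + j]'(by omega))).map
               (· ++ data.flatMap (fun p => pvCell p ((s : Int) + (j : Int))))) := by
  have hrange : ∀ (p : List String) (d : PySem.Dict String (List Int)),
      (PySem.List.pyRange (s : Int) ((e : Int) + 1) 1).foldl (pvStepA ident p) d =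
        (List.range (e + 1 - s)).foldl (fun d (t : Nat) => pvStepA ident p d ((s : Int) + (t : Int))) d := by
    intro p d
    rw [PySem.List.pyRange_one]
    rw [show ((e : Int) + 1 - (s : Int)).toNat = e + 1 - s by omega]
    rw [List.foldl_map]
  intro data
  induction data with
  | nil =>
    intro d hkeys
    refine ⟨hkeys, ?_⟩
    intro j hj
    cases hdg : d.get? (ident[s + j]'(by omega)) <;> simp [hdg]
  | cons p rest ih =>
    intro d hkeys
    obtain ⟨hk1, hg1⟩ := pvInnerFold ident p s e cols hcols hnd hel (List.range (e + 1 - s)) d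
      (List.nodup_range) (fun t ht => List.mem_range.mp ht) hkeys
    obtain ⟨hk2, hg2⟩ := ih ((List.range (e + 1 - s)).foldl
      (fun d (t : Nat) => pvStepA ident p d ((s : Int) + (t : Int))) d) hk1
    constructor
    · rw [List.foldl_cons, hrange p d]; exact hk2
    · intro j hj
      rw [List.foldl_cons, hrange p d, hg2 j hj, hg1 j hj, if_pos (List.mem_range.mpr hj)]
      cases d.get? (ident[s + j]'(by omega)) <;> simp

-- zip(*grid) on a rectangular grid is the list of its L columns
lemma pvZipStar_rect {α : Type} [Inhabited α] :
    ∀ (L : Nat) (grid : List (List α)), grid ≠ [] → (∀ r ∈ grid, r.length = L) →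
      pvZipStar grid = (List.range L).map (fun j => grid.map (fun r => r.getD j default)) := by
  intro L
  induction L with
  | zero =>
    intro grid hne hlen
    rw [pvZipStar]
    rw [dif_neg]
    · simp
    · rintro ⟨-, hrows⟩
      rcases grid with _ | ⟨r, rest⟩
      · exact hne rfl
      · exact hrows r List.mem_cons_self (List.eq_nil_of_length_eq_zero (hlen r List.mem_cons_self))
  | succ L ih =>
    intro grid hne hlen
    have hrne : ∀ r ∈ grid, r ≠ [] := by
      intro r hr h
      have := hlen r hr
      rw [h] at this
      simp at this
    rw [pvZipStar, dif_pos ⟨hne, hrne⟩]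
    have htne : grid.map List.tail ≠ [] := by
      intro h; exact hne (List.map_eq_nil_iff.mp h)
    have htlen : ∀ r ∈ grid.map List.tail, r.length = L := by
      intro r hr
      obtain ⟨r0, hr0, rfl⟩ := List.mem_map.mp hr
      have := hlen r0 hr0
      simp [List.length_tail]
      omega
    rw [ih (grid.map List.tail) htne htlen]
    rw [List.range_succ_eq_map]
    simp only [List.map_cons, List.map_map]
    congr 1
    · refine List.map_congr_left ?_
      intro r hr
      rcases r with _ | ⟨a, as⟩
      · exact absurd rfl (hrne _ hr)
      · simp
    · refine List.map_congr_left ?_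
      intro j _
      simp only [Function.comp]
      refine List.map_congr_left ?_
      intro r hr
      rcases r with _ | ⟨a, as⟩
      · exact absurd rfl (hrne _ hr)
      · simp

-- flatMap of pvCell is filterMap of the parsed cell
lemma pvFlatMap_cell (data : List (List String)) (i : Int) :
    data.flatMap (fun p => pvCell p i) =
      data.filterMap (fun p => (PySem.List.pyGet? p i).bind PySem.Int.ofStr?) := by
  induction data with
  | nil => simp
  | cons p rest ih =>
    rw [List.flatMap_cons, List.filterMap_cons, ih]
    unfold pvCell
    rcases h : (PySem.List.pyGet? p i).bind PySem.Int.ofStr? with _ | v <;> simp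

-- ===== VERDICT (by name: the statement is the Claim_ definition above) =====
theorem get_correlation_data_spec : Claim_equal_get_correlation_data := by
  intro data ident _ hpre
  obtain ⟨hF, hS, hndup, hlong⟩ := hpre
  unfold Spec_get_correlation_data get_correlation_data get_correlation_data_alt
  have hidxF : PySem.List.index? ident "Finishing" = some (ident.idxOf "Finishing") :=
    pvIndex?_of_mem ident _ hF
  have hidxS : PySem.List.index? ident "SlidingTackle" = some (ident.idxOf "SlidingTackle") :=
    pvIndex?_of_mem ident _ hS
  simp only [hidxF, hidxS]
  set s := ident.idxOf "Finishing" with hsdef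
  set e := ident.idxOf "SlidingTackle" with hedef
  have hel : e < ident.length := List.idxOf_lt_length_of_mem hS
  have hslice : PySem.List.slice ident (some (s : Int)) (some ((e : Int) + 1)) =
      (ident.drop s).take (e + 1 - s) := by
    rw [show ((e : Int) + 1) = ((e + 1 : Nat) : Int) by push_cast; ring,
        PySem.List.slice_natCast]
  rw [hslice]
  set cols := (ident.drop s).take (e + 1 - s) with hcolsdef
  set L := e + 1 - s with hLdef
  have hlen : cols.length = L := by
    rw [hcolsdef]; simp; omega
  -- A's initial dict
  obtain ⟨hk0, hg0, _⟩ := pvFoldInsert (fun (x : String) => x) (fun _ => ([] : List Int)) cols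
    PySem.Dict.empty (by simpa using hndup)
    (by intro x hx; simp [PySem.Dict.empty, PySem.Dict.get?])
  have hk0' : (cols.foldl (fun d stat => d.insert stat ([] : List Int)) (PySem.Dict.empty : PySem.Dict String (List Int))).keys = cols := by
    simpa [PySem.Dict.empty, PySem.Dict.keys] using hk0
  -- A's final dict
  obtain ⟨hkA, hgA⟩ := pvOuterFold ident s e cols rfl hndup hel data _ hk0'
  -- B's grid and columns
  set grid := data.map (fun row =>
    (PySem.List.slice row (some (s : Int)) (some ((e : Int) + 1))).map pvParse) with hgriddef
  set columns := if grid ≠ [] then pvZipStar grid else List.replicate cols.length ([] : List (Option Int)) with hcolumnsdef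
  have hsl : s < ident.length := List.idxOf_lt_length_of_mem hF
  -- under Pre_ (when the range is nonempty) every grid row has length L
  have hgrow : s ≤ e → ∀ r ∈ grid, r.length = L := by
    intro hse r hr
    obtain ⟨row, hrow, rfl⟩ := List.mem_map.mp hr
    have hrl : e < row.length := hlong hse row hrow
    rw [show PySem.List.slice row (some (s : Int)) (some ((e : Int) + 1)) =
        (row.drop s).take (e + 1 - s) by
      rw [show ((e : Int) + 1) = ((e + 1 : Nat) : Int) by push_cast; ring,
          PySem.List.slice_natCast]]
    simp [hLdef]
    omega
  have hcolumns : ∀ (j : Nat), j < L →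
      columns[j]? = some (grid.map (fun r => r.getD j none)) := by
    intro j hj
    have hse : s ≤ e := by omega
    rw [hcolumnsdef]
    by_cases hd : grid = []
    · rw [hd]
      simp only [ne_eq, not_true_eq_false, if_false]
      rw [List.getElem?_replicate, if_pos (by rw [hlen]; exact hj)]
      simp
    · rw [if_pos hd]
      rw [pvZipStar_rect L grid hd (hgrow hse)]
      rw [List.getElem?_map, List.getElem?_range hj]
      rfl
  have hcollen : L ≤ columns.length := by
    by_cases hse : s ≤ e
    · rw [hcolumnsdef]
      by_cases hd : grid = []
      · rw [hd]; simp [hlen]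
      · rw [if_pos hd, pvZipStar_rect L grid hd (hgrow hse)]; simp
    · have : L = 0 := by omega
      omega
  -- the parsed column j, filtered, is A's flatMap of pvCell
  have hcolval : ∀ (j : Nat), j < L →
      (grid.map (fun r => r.getD j none)).filterMap id =
        data.flatMap (fun p => pvCell p ((s : Int) + (j : Int))) := by
    intro j hj
    rw [pvFlatMap_cell, hgriddef, List.map_map, List.filterMap_map]
    refine List.filterMap_congr ?_
    intro row hrow
    have hrl : e < row.length := hlong (by omega) row hrow
    simp only [Function.comp]
    rw [show PySem.List.slice row (some (s : Int)) (some ((e : Int) + 1)) =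
        (row.drop s).take (e + 1 - s) by
      rw [show ((e : Int) + 1) = ((e + 1 : Nat) : Int) by push_cast; ring,
          PySem.List.slice_natCast]]
    have hsj : s + j < row.length := by omega
    have hjlt : j < ((row.drop s).take (e + 1 - s)).length := by simp; omega
    have hget : ((row.drop s).take (e + 1 - s))[j]'hjlt = row[s + j]'hsj := by
      rw [List.getElem_take, List.getElem_drop]
    rw [List.getD_eq_getElem _ _ (by simpa using hjlt), List.getElem_map, hget]
    have hpg : PySem.List.pyGet? row ((s : Int) + (j : Int)) = some (row[s + j]'hsj) := by
      rw [show (s : Int) + (j : Int) = ((s + j : Nat) : Int) by push_cast; ring,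
          PySem.List.pyGet?_natCast, List.getElem?_eq_getElem hsj]
    rw [hpg]
    rfl
  -- B's dict: a fold of fresh inserts over cols.zip columns
  have hzipfst : (cols.zip columns).map Prod.fst = cols :=
    List.map_fst_zip (by rw [hlen]; exact hcollen)
  obtain ⟨hkB, hgB, _⟩ := pvFoldInsert (Prod.fst : String × List (Option Int) → String)
    (fun q => q.2.filterMap id) (cols.zip columns) PySem.Dict.empty
    (by rw [hzipfst]; exact hndup)
    (by intro x hx; simp [PySem.Dict.empty, PySem.Dict.get?])
  have hkB' : ((cols.zip columns).foldl
      (fun d q => d.insert q.1 (q.2.filterMap id)) (PySem.Dict.empty : PySem.Dict String (List Int))).keys = cols := by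
    have := hkB
    rw [hzipfst] at this
    simpa [PySem.Dict.empty, PySem.Dict.keys] using this
  refine Prod.ext ?_ rfl
  -- items of both dicts
  rw [PySem.Dict.items_eq_map_keys _ (by rw [hkA]; exact hndup) [],
      PySem.Dict.items_eq_map_keys _ (by rw [hkB']; exact hndup) [],
      hkA, hkB']
  refine List.map_congr_left ?_
  intro k hk
  obtain ⟨j, hj, hjk⟩ := List.mem_iff_getElem.mp hk
  have hjn : j < L := hlen ▸ hj
  have hje : cols[j]'hj = ident[s + j]'(by omega) := by
    simp [hcolsdef]
  -- A's value at k
  have hA : (data.foldl (fun d p =>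
      (PySem.List.pyRange (s : Int) ((e : Int) + 1) 1).foldl (pvStepA ident p) d)
        (cols.foldl (fun d stat => d.insert stat ([] : List Int)) (PySem.Dict.empty : PySem.Dict String (List Int)))).get? k =
      some (data.flatMap (fun p => pvCell p ((s : Int) + (j : Int)))) := by
    rw [← hjk, hje, hgA j hjn]
    have h0 : (cols.foldl (fun d stat => d.insert stat ([] : List Int)) (PySem.Dict.empty : PySem.Dict String (List Int))).get?
        (ident[s + j]'(by omega)) = some [] := by
      have := hg0 (cols[j]'hj) (List.getElem_mem hj)
      rw [hje] at this
      simpa using this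
    rw [h0]
    simp
  -- B's value at k
  have hB : ((cols.zip columns).foldl
      (fun d q => d.insert q.1 (q.2.filterMap id)) (PySem.Dict.empty : PySem.Dict String (List Int))).get? k =
      some (data.flatMap (fun p => pvCell p ((s : Int) + (j : Int)))) := by
    have hjc : j < columns.length := by omega
    have hjz : j < (cols.zip columns).length := by
      rw [List.length_zip, hlen]; omega
    have hmem : ((cols.zip columns)[j]'hjz) ∈ cols.zip columns := List.getElem_mem hjz
    have hpair : ((cols.zip columns)[j]'hjz) = (cols[j]'hj, columns[j]'hjc) := by
      rw [List.getElem_zip]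
    have hval : (columns[j]'hjc) = grid.map (fun r => r.getD j none) := by
      have := hcolumns j hjn
      rw [List.getElem?_eq_getElem hjc] at this
      exact Option.some.inj this
    have := hgB _ hmem
    rw [hpair] at this
    simp only at this
    rw [← hjk, this, hval, hcolval j hjn]
  simp only [PySem.Dict.getD, hA, hB]
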